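-- pv_equiv track=rewrite | github.com/DA-testa/string-pattern-JanisZageris | hash_substring.py | precompute_hashes
-- ===== SOURCE A (Python) =====
-- def compute_hash(s, p, x):
--     # aprēķina string hash vērtību izmantojot pirmskaitli un inteģeri
--     h = 0
--     for c in reversed(s):
--         h = (h * x + ord(c)) % p
--     return h
--
-- def precompute_hashes(text, pattern_length, p, x):
--     # aprēķina visas hash vērtības
--     t = len(text) - pattern_length
--     hashes = [0] * (t + 1)
--     last_substring = text[-pattern_length:]
--     hashes[t] = compute_hash(last_substring, p, x)
--     y = 1
--     for i in range(pattern_length):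
--         y = (y * x) % p
--     for i in range(t-1, -1, -1):
--         current_substring = text[i:i+pattern_length]
--         hashes[i] = (x * hashes[i+1] + ord(current_substring[0]) - y * ord(last_substring[-1])) % p
--         last_substring = current_substring
--     return hashes
-- ===== SOURCE B (Python) =====
-- def precompute_hashes(text, pattern_length, p, x):
--     n = len(text)
--     # suffix hashes: S[i] = hash of text[i:] mod p, S[n] = 0
--     S = [0] * (n + 1)
--     for i in range(n - 1, -1, -1):
--         S[i] = (ord(text[i]) + x * S[i + 1]) % p
--     y = pow(x, pattern_length, p)
--     # hash of window at i = S[i] - x^m * S[i+m]  (mod p), computed independently per window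
--     return [(S[i] - y * S[i + pattern_length]) % p for i in range(n - pattern_length + 1)]
-- ===== Notes on version B (the rewrite author's own statement) =====
-- stated objective: faster
-- what changed: B precomputes a suffix-hash array S (S[i] = hash of text[i:]) in one pass and then emits each window hash independently as (S[i] - x^m*S[i+m]) % p, replacing A's right-to-left rolling recurrence with per-step substring slicing; each window costs O(1) instead of O(m).
-- outside the precondition, e.g. on precompute_hashes('', 0, 0, 0): A returns [0], B raises ValueError
import Mathlib
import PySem

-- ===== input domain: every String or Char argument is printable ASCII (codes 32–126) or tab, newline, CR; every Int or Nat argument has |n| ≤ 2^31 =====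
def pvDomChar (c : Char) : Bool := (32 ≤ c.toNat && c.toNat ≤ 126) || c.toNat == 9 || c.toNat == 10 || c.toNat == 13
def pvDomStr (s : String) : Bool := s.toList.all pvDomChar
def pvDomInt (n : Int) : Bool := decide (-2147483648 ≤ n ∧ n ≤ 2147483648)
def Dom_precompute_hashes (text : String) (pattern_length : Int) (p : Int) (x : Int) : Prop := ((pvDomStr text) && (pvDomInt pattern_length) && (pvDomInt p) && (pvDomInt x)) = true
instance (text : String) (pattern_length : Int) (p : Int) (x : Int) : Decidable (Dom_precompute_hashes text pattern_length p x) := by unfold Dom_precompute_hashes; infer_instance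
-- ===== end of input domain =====

-- B replaces A's right-to-left rolling recurrence over substring slices by a suffix-hash array
-- S (one pass) plus an independent O(1) formula (S[i] - x^m*S[i+m]) % p per window: O(n) vs O(n*m).

-- ===== PORT A =====
def computeHash (s : List Char) (p x : Int) : Int :=
  s.reverse.foldl (fun h c => PySem.Int.mod (h * x + (c.toNat : Int)) p) 0

def precompute_hashes (text : String) (pattern_length : Int) (p : Int) (x : Int) : List Int :=
  let cs := text.toList
  let t : Int := (cs.length : Int) - pattern_length
  let hashes : List Int := List.replicate (t + 1).toNat 0
  let last0 : List Char := PySem.List.slice cs (some (-pattern_length)) none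
  let hashes := PySem.List.pySetD hashes t (computeHash last0 p x)
  let y : Int := (PySem.List.pyRange 0 pattern_length 1).foldl (fun y _ => PySem.Int.mod (y * x) p) 1
  let st := (PySem.List.pyRange (t - 1) (-1) (-1)).foldl
    (fun (st : List Int × List Char) i =>
      let cur := PySem.List.slice cs (some i) (some (i + pattern_length))
      let h := PySem.Int.mod
        (x * PySem.List.pyGetD st.1 (i + 1) 0
          + ((PySem.List.pyGetD cur 0 ' ').toNat : Int)
          - y * ((PySem.List.pyGetD st.2 (-1) ' ').toNat : Int)) p
      (PySem.List.pySetD st.1 i h, cur))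
    (hashes, last0)
  st.1

-- ===== PORT B =====
def precompute_hashes_alt (text : String) (pattern_length : Int) (p : Int) (x : Int) : List Int :=
  let cs := text.toList
  let n : Int := (cs.length : Int)
  let S := (PySem.List.pyRange (n - 1) (-1) (-1)).foldl
    (fun S i => PySem.List.pySetD S i
      (PySem.Int.mod (((PySem.List.pyGetD cs i ' ').toNat : Int) + x * PySem.List.pyGetD S (i + 1) 0) p))
    (List.replicate (n + 1).toNat 0)
  let y : Int := PySem.Int.powMod x pattern_length.toNat p
  (PySem.List.pyRange 0 (n - pattern_length + 1) 1).map
    (fun i => PySem.Int.mod (PySem.List.pyGetD S i 0 - y * PySem.List.pyGetD S (i + pattern_length) 0) p)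

-- ===== PRECONDITION & SPEC =====
-- Exactly the inputs on which A returns, except that p = 0 is excluded outright: there A raises
-- ZeroDivisionError except in the degenerate corner ('', 0, 0, x) where its loops never reach the
-- modulo and it returns [0], while B's pow(x, 0, 0) raises ValueError. Besides p ≠ 0, A needs a
-- window 1 ≤ pattern_length ≤ len(text), or pattern_length = 0 with empty text (any other
-- pattern_length makes A hit an IndexError).
def Pre_precompute_hashes (text : String) (pattern_length : Int) (p : Int) (x : Int) : Prop :=
  p ≠ 0 ∧ ((1 ≤ pattern_length ∧ pattern_length ≤ (text.toList.length : Int)) ∨ (pattern_length = 0 ∧ text = ""))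
instance (text : String) (pattern_length : Int) (p : Int) (x : Int) : Decidable (Pre_precompute_hashes text pattern_length p x) := by unfold Pre_precompute_hashes; infer_instance

def pvWitness_precompute_hashes : String × Int × Int × Int := ("abcab", 2, 97, 31)

def Spec_precompute_hashes (text : String) (pattern_length : Int) (p : Int) (x : Int) (out : List Int) : Prop := out = precompute_hashes_alt text pattern_length p x
instance (text : String) (pattern_length : Int) (p : Int) (x : Int) (out : List Int) : Decidable (Spec_precompute_hashes text pattern_length p x out) := by unfold Spec_precompute_hashes; infer_instance

-- ===== CLAIM (what is proved, stated in full; the proofs are below) =====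
def Claim_equal_precompute_hashes : Prop := ∀ (text : String) (pattern_length : Int) (p : Int) (x : Int), Dom_precompute_hashes text pattern_length p x → Pre_precompute_hashes text pattern_length p x → Spec_precompute_hashes text pattern_length p x (precompute_hashes text pattern_length p x)

-- ===== LEMMAS AND PROOFS =====

-- congruent integers have equal Python-% results
theorem fmod_congr (a b n : Int) (h : n ∣ (a - b)) : PySem.Int.mod a n = PySem.Int.mod b n := by
  obtain ⟨c, hc⟩ := h
  have : a = b + n * c := by omega
  simp only [PySem.Int.mod, this, Int.add_mul_fmod_self_left]

theorem dvd_mod_sub (a p : Int) : p ∣ (PySem.Int.mod a p - a) := by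
  exact ⟨-(a.fdiv p), by simp only [PySem.Int.mod]; rw [Int.fmod_def]; ring⟩

theorem mod_mul_mod (a b p : Int) : PySem.Int.mod (PySem.Int.mod a p * b) p = PySem.Int.mod (a * b) p := by
  apply fmod_congr
  obtain ⟨c, hc⟩ := dvd_mod_sub a p
  exact ⟨c * b, by linear_combination b * hc⟩

theorem mod_mul_add (a b c p : Int) :
    PySem.Int.mod (PySem.Int.mod a p * b + c) p = PySem.Int.mod (a * b + c) p := by
  apply fmod_congr
  obtain ⟨d, hd⟩ := dvd_mod_sub a p
  exact ⟨d * b, by linear_combination b * hd⟩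

theorem mod_add_mul_mod (c x a p : Int) :
    PySem.Int.mod (c + x * PySem.Int.mod a p) p = PySem.Int.mod (c + x * a) p := by
  apply fmod_congr
  obtain ⟨d, hd⟩ := dvd_mod_sub a p
  exact ⟨x * d, by linear_combination x * hd⟩

theorem mod_lin (x a c e d p : Int) :
    PySem.Int.mod (x * PySem.Int.mod a p + c - PySem.Int.mod e p * d) p
      = PySem.Int.mod (x * a + c - e * d) p := by
  apply fmod_congr
  obtain ⟨u, hu⟩ := dvd_mod_sub a p
  obtain ⟨v, hv⟩ := dvd_mod_sub e p
  exact ⟨x * u - v * d, by linear_combination x * hu - d * hv⟩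

theorem mod_sub_mul (a e b p : Int) :
    PySem.Int.mod (PySem.Int.mod a p - PySem.Int.mod e p * PySem.Int.mod b p) p
      = PySem.Int.mod (a - e * b) p := by
  apply fmod_congr
  obtain ⟨u, hu⟩ := dvd_mod_sub a p
  obtain ⟨v, hv⟩ := dvd_mod_sub e p
  obtain ⟨w, hw⟩ := dvd_mod_sub b p
  exact ⟨u - v * PySem.Int.mod b p - e * w, by linear_combination hu - PySem.Int.mod b p * hv - e * hw⟩

-- polynomial hash value of a character list: poly [c0,c1,…] = c0 + c1*x + c2*x^2 + …
def poly (l : List Char) (x : Int) : Int := l.foldr (fun c h => h * x + (c.toNat : Int)) 0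

theorem poly_cons (c : Char) (l : List Char) (x : Int) :
    poly (c :: l) x = poly l x * x + (c.toNat : Int) := rfl

theorem poly_append (l1 l2 : List Char) (x : Int) :
    poly (l1 ++ l2) x = poly l1 x + x ^ l1.length * poly l2 x := by
  induction l1 with
  | nil => simp [poly]
  | cons c l ih =>
    simp only [List.cons_append, poly_cons, ih, List.length_cons, pow_succ]
    ring

theorem computeHash_eq (s : List Char) (p x : Int) :
    computeHash s p x = PySem.Int.mod (poly s x) p := by
  induction s with
  | nil => simp [computeHash, poly, PySem.Int.mod]
  | cons c l ih =>
    simp only [computeHash, List.reverse_cons, List.foldl_append, List.foldl_cons, List.foldl_nil] at *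
    rw [ih, poly_cons, mod_mul_add]

-- A's pow-by-loop computes x^M mod p (for M ≥ 1)
theorem ypow (p x : Int) : ∀ M : Nat, 1 ≤ M →
    (PySem.List.pyRange 0 (M : Int) 1).foldl (fun y _ => PySem.Int.mod (y * x) p) 1
      = PySem.Int.mod (x ^ M) p := by
  intro M
  induction M with
  | zero => omega
  | succ M ih =>
    intro _
    rcases Nat.eq_zero_or_pos M with hM | hM
    · subst hM
      rw [show ((1 : Nat) : Int) = 0 + 1 by norm_num, PySem.List.pyRange_one_singleton]
      simp
    · have : ((M + 1 : Nat) : Int) = (M : Int) + 1 := by push_cast; ring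
      rw [this, PySem.List.pyRange_one_succ_right (by positivity), List.foldl_append, ih hM]
      simp [mod_mul_mod, pow_succ]

theorem getD_replicate_append (j : Nat) (v : Int) (l : List Int) (d : Int) :
    (List.replicate j v ++ l).getD j d = l.getD 0 d := by
  induction j with
  | zero => simp
  | succ j ih => simpa [List.replicate_succ] using ih

theorem set_replicate_append (j : Nat) (v a : Int) (l : List Int) :
    (List.replicate (j + 1) v ++ l).set j a = List.replicate j v ++ a :: l := by
  induction j with
  | zero => simp [List.replicate_succ]
  | succ j ih => simpa [List.replicate_succ] using ih

-- ord of the character at a (Nat) position, total form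
def ordAt (cs : List Char) (i : Nat) : Int := ((cs.getD i ' ').toNat : Int)

-- A's value sequence: hseq k is the hash of the window starting at position T - k
def hseq (cs : List Char) (p x : Int) (M T : Nat) : Nat → Int
  | 0 => computeHash (cs.drop T) p x
  | k + 1 => PySem.Int.mod
      (x * hseq cs p x M T k + ordAt cs (T - (k + 1))
        - PySem.Int.mod (x ^ M) p * ordAt cs (T - (k + 1) + M)) p

-- hseq k is the canonical mod-p hash of the window at T - k
theorem hseq_eq (cs : List Char) (p x : Int) (M T : Nat) (hM : 1 ≤ M) (hTM : T + M = cs.length) :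
    ∀ k, k ≤ T → hseq cs p x M T k = PySem.Int.mod (poly ((cs.drop (T - k)).take M) x) p := by
  intro k
  induction k with
  | zero =>
    intro _
    rw [hseq, Nat.sub_zero, computeHash_eq]
    congr 2
    rw [List.take_of_length_le (by simp [List.length_drop]; omega)]
  | succ k ih =>
    intro hk
    set i := T - (k + 1) with hi
    have hi1 : T - k = i + 1 := by omega
    have hin : i + 1 + M ≤ cs.length := by omega
    have hiltn : i < cs.length := by omega
    have himn : i + M < cs.length := by omega
    rw [hseq, ih (by omega), hi1, mod_lin]
    congr 1
    -- window decomposition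
    have hw1 : cs.drop i = cs[i] :: cs.drop (i + 1) := List.drop_eq_getElem_cons hiltn
    have hlen1 : M - 1 < (cs.drop (i + 1)).length := by simp [List.length_drop]; omega
    have hw2 : (cs.drop (i + 1)).take M
        = (cs.drop (i + 1)).take (M - 1) ++ [(cs.drop (i + 1))[M - 1]'hlen1] := by
      conv_lhs => rw [show M = (M - 1) + 1 by omega]
      rw [List.take_add_one, List.getElem?_eq_getElem hlen1]
      simp
    have hget : (cs.drop (i + 1))[M - 1]'(by omega) = cs[i + M]'himn := by
      rw [List.getElem_drop]
      congr 1
      omega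
    have hlen2 : ((cs.drop (i + 1)).take (M - 1)).length = M - 1 := by
      simp [List.length_take, List.length_drop]; omega
    rw [hw1, show M = (M - 1) + 1 by omega, List.take_succ_cons, poly_cons,
      show (M - 1) + 1 = M from by omega, hw2, hget, poly_append, hlen2]
    have hsing : poly [cs[i + M]'himn] x = ((cs[i + M]'himn).toNat : Int) := by
      simp [poly]
    have hxM : x * x ^ (M - 1) = x ^ M := by
      rw [← pow_succ']
      congr 1
      omega
    have hoi : ordAt cs i = (cs[i]'hiltn).toNat := by
      simp [ordAt, List.getElem?_eq_getElem hiltn]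
    have hoim : ordAt cs (i + M) = (cs[i + M]'himn).toNat := by
      simp [ordAt, List.getElem?_eq_getElem himn]
    rw [hoi, hoim, hsing, ← hxM]
    ring

-- A's main loop invariant: counting down from j-1, the hash array fills with hseq values
theorem Ainv (cs : List Char) (p x : Int) (M T : Nat) (hM : 1 ≤ M) (hTM : T + M = cs.length) :
    ∀ j, j ≤ T →
    ((PySem.List.pyRange ((j : Int) - 1) (-1) (-1)).foldl
        (fun (st : List Int × List Char) i =>
          (PySem.List.pySetD st.1 i
            (PySem.Int.mod
              (x * PySem.List.pyGetD st.1 (i + 1) 0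
                + ((PySem.List.pyGetD (PySem.List.slice cs (some i) (some (i + (M : Int)))) 0 ' ').toNat : Int)
                - PySem.Int.mod (x ^ M) p * ((PySem.List.pyGetD st.2 (-1) ' ').toNat : Int)) p),
           PySem.List.slice cs (some i) (some (i + (M : Int)))))
        (List.replicate j 0 ++ (List.range (T + 1 - j)).map (fun k => hseq cs p x M T (T - j - k)),
         (cs.drop j).take M)).1
      = (List.range (T + 1)).map (fun k => hseq cs p x M T (T - k)) := by
  intro j
  induction j with
  | zero =>
    intro _
    rw [show ((0 : Nat) : Int) - 1 = -1 by norm_num]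
    rw [PySem.List.pyRange_neg_one_eq_nil (by norm_num)]
    simp
  | succ j ih =>
    intro hj
    have hjn : j < cs.length := by omega
    have hjMn : j + 1 + M ≤ cs.length := by omega
    rw [show ((j + 1 : Nat) : Int) - 1 = (j : Int) by push_cast; ring]
    rw [PySem.List.pyRange_neg_one_cons (by omega), List.foldl_cons]
    have h1 : PySem.List.slice cs (some (j : Int)) (some ((j : Int) + (M : Int)))
        = (cs.drop j).take M := PySem.List.slice_natCast_add cs j M
    have h2 : PySem.List.pyGetD
        (List.replicate (j + 1) 0 ++ (List.range (T + 1 - (j + 1))).map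
          (fun k => hseq cs p x M T (T - (j + 1) - k))) ((j : Int) + 1) 0
        = hseq cs p x M T (T - (j + 1)) := by
      rw [show ((j : Int) + 1) = ((j + 1 : Nat) : Int) by push_cast; ring]
      rw [PySem.List.pyGetD_natCast, getD_replicate_append]
      rw [show T + 1 - (j + 1) = (T - (j + 1)) + 1 by omega, List.range_succ_eq_map]
      simp
    have h3 : PySem.List.pyGetD ((cs.drop j).take M) 0 ' ' = cs.getD j ' ' := by
      rw [List.drop_eq_getElem_cons hjn]
      rw [show M = (M - 1) + 1 by omega, List.take_succ_cons]
      rw [PySem.List.pyGetD_zero_cons, List.getD_eq_getElem cs ' ' hjn]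
    have h4 : PySem.List.pyGetD ((cs.drop (j + 1)).take M) (-1) ' ' = cs.getD (j + M) ' ' := by
      rw [PySem.List.pyGetD_neg_ofNat ((cs.drop (j + 1)).take M) 1 ' ' (by norm_num) (by
        simp [List.length_take, List.length_drop]; omega)]
      rw [List.getD_eq_getElem cs ' ' (show j + M < cs.length by omega)]
      have hlen : ((cs.drop (j + 1)).take M).length = M := by
        simp [List.length_take, List.length_drop]; omega
      simp only [List.getElem_take, List.getElem_drop, hlen]
      congr 1
      omega
    rw [h1, h2, h3, h4]
    have h6 : PySem.Int.mod
        (x * hseq cs p x M T (T - (j + 1)) + ((cs.getD j ' ').toNat : Int)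
          - PySem.Int.mod (x ^ M) p * ((cs.getD (j + M) ' ').toNat : Int)) p
        = hseq cs p x M T (T - j) := by
      rw [show T - j = (T - (j + 1)) + 1 by omega, hseq]
      have e1 : T - (T - (j + 1) + 1) = j := by omega
      rw [e1]
      simp [ordAt]
    rw [h6]
    have h5 : PySem.List.pySetD
        (List.replicate (j + 1) 0 ++ (List.range (T + 1 - (j + 1))).map
          (fun k => hseq cs p x M T (T - (j + 1) - k))) (j : Int) (hseq cs p x M T (T - j))
        = List.replicate j 0 ++ (List.range (T + 1 - j)).map (fun k => hseq cs p x M T (T - j - k)) := by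
      rw [PySem.List.pySetD_natCast, set_replicate_append]
      congr 1
      rw [show T + 1 - j = (T - j) + 1 by omega, List.range_succ_eq_map, List.map_cons, List.map_map]
      congr 1
      · rw [show T + 1 - (j + 1) = T - j by omega]
        apply List.map_congr_left
        intro k _
        simp only [Function.comp_apply]
        congr 1
        omega
    rw [h5]
    exact ih (by omega)

-- B's suffix-hash values: Sv i = hash of cs[i:] mod p (Sv n = 0 since mod 0 p = 0)
def Sv (cs : List Char) (p x : Int) (i : Nat) : Int := PySem.Int.mod (poly (cs.drop i) x) p

-- B's first loop invariant: counting down from j-1, the array fills with suffix hashes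
theorem Sinv (cs : List Char) (p x : Int) (n : Nat) (hn : n = cs.length) :
    ∀ j, j ≤ n →
    ((PySem.List.pyRange ((j : Int) - 1) (-1) (-1)).foldl
        (fun S i => PySem.List.pySetD S i
          (PySem.Int.mod (((PySem.List.pyGetD cs i ' ').toNat : Int) + x * PySem.List.pyGetD S (i + 1) 0) p))
        (List.replicate j 0 ++ (List.range (n + 1 - j)).map (fun k => Sv cs p x (j + k))))
      = (List.range (n + 1)).map (fun k => Sv cs p x k) := by
  intro j
  induction j with
  | zero =>
    intro _
    rw [show ((0 : Nat) : Int) - 1 = -1 by norm_num]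
    rw [PySem.List.pyRange_neg_one_eq_nil (by norm_num)]
    simp
  | succ j ih =>
    intro hj
    have hjn : j < cs.length := by omega
    rw [show ((j + 1 : Nat) : Int) - 1 = (j : Int) by push_cast; ring]
    rw [PySem.List.pyRange_neg_one_cons (by omega), List.foldl_cons]
    have h2 : PySem.List.pyGetD
        (List.replicate (j + 1) 0 ++ (List.range (n + 1 - (j + 1))).map
          (fun k => Sv cs p x (j + 1 + k))) ((j : Int) + 1) 0
        = Sv cs p x (j + 1) := by
      rw [show ((j : Int) + 1) = ((j + 1 : Nat) : Int) by push_cast; ring]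
      rw [PySem.List.pyGetD_natCast, getD_replicate_append]
      rw [show n + 1 - (j + 1) = (n - (j + 1)) + 1 by omega, List.range_succ_eq_map]
      simp
    rw [PySem.List.pyGetD_natCast, h2]
    have h6 : PySem.Int.mod (((cs.getD j ' ').toNat : Int) + x * Sv cs p x (j + 1)) p
        = Sv cs p x j := by
      simp only [Sv, mod_add_mul_mod]
      congr 1
      rw [List.drop_eq_getElem_cons hjn, poly_cons, List.getD_eq_getElem cs ' ' hjn]
      ring
    rw [h6]
    have h5 : PySem.List.pySetD
        (List.replicate (j + 1) 0 ++ (List.range (n + 1 - (j + 1))).map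
          (fun k => Sv cs p x (j + 1 + k))) (j : Int) (Sv cs p x j)
        = List.replicate j 0 ++ (List.range (n + 1 - j)).map (fun k => Sv cs p x (j + k)) := by
      rw [PySem.List.pySetD_natCast, set_replicate_append,
        show n + 1 - (j + 1) = n - j by omega,
        show n + 1 - j = (n - j) + 1 by omega, List.range_succ_eq_map, List.map_cons, List.map_map]
      refine congrArg _ (congrArg₂ _ (by simp) ?_)
      exact List.map_congr_left (fun k _ => by simp only [Function.comp_apply]; congr 1; omega)
    rw [h5]
    exact ih (by omega)

-- the per-window formula from suffix hashes is the canonical window hash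
theorem window_formula (cs : List Char) (p x : Int) (M k : Nat) (hkM : k + M ≤ cs.length) :
    PySem.Int.mod (Sv cs p x k - PySem.Int.mod (x ^ M) p * Sv cs p x (k + M)) p
      = PySem.Int.mod (poly ((cs.drop k).take M) x) p := by
  simp only [Sv, mod_sub_mul]
  apply fmod_congr
  have hsplit : cs.drop k = (cs.drop k).take M ++ cs.drop (k + M) := by
    rw [show cs.drop (k + M) = (cs.drop k).drop M by rw [List.drop_drop, Nat.add_comm]]
    exact (List.take_append_drop M (cs.drop k)).symm
  have hlen : ((cs.drop k).take M).length = M := by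
    simp [List.length_take, List.length_drop]; omega
  have hpoly : poly (cs.drop k) x
      = poly ((cs.drop k).take M) x + x ^ M * poly (cs.drop (k + M)) x := by
    conv_lhs => rw [hsplit]
    rw [poly_append, hlen]
  exact ⟨0, by rw [hpoly]; ring⟩

-- ===== VERDICT (by name: the statement is the Claim_ definition above) =====
theorem precompute_hashes_spec : Claim_equal_precompute_hashes := by
  intro text pattern_length p x hdom hpre
  unfold Spec_precompute_hashes
  obtain ⟨hp, hcase⟩ := hpre
  rcases hcase with ⟨hm1, hmn⟩ | ⟨hm0, htext⟩
  · -- main case: 1 ≤ pattern_length ≤ len(text)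
    simp only [precompute_hashes, precompute_hashes_alt, PySem.Int.powMod]
    set cs := text.toList with hcs
    set M := pattern_length.toNat with hMdef
    have hpl : pattern_length = (M : Int) := by omega
    have hMn : M ≤ cs.length := by omega
    have hM : 1 ≤ M := by omega
    set T := cs.length - M with hTdef
    have hTM : T + M = cs.length := by omega
    rw [hpl]
    -- ===== A side =====
    rw [show (cs.length : Int) - (M : Int) = (T : Int) by omega]
    rw [show ((T : Int) + 1).toNat = T + 1 by omega]
    rw [PySem.List.slice_from_neg_natCast cs M (by omega), show cs.length - M = T from rfl]
    rw [ypow p x M hM]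
    rw [show PySem.List.pySetD (List.replicate (T + 1) 0) (T : Int) (computeHash (cs.drop T) p x)
          = List.replicate T 0 ++ (List.range (T + 1 - T)).map (fun k => hseq cs p x M T (T - T - k)) by
        rw [PySem.List.pySetD_natCast]
        rw [show (List.replicate (T + 1) 0) = List.replicate (T + 1) 0 ++ ([] : List Int) by simp]
        rw [set_replicate_append]
        rw [show T + 1 - T = 1 by omega]
        simp [hseq]]
    rw [show cs.drop T = (cs.drop T).take M by
        rw [List.take_of_length_le (by simp [List.length_drop]; omega)]]
    rw [Ainv cs p x M T hM hTM T le_rfl]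
    -- ===== B side =====
    rw [show ((cs.length : Int) + 1).toNat = cs.length + 1 by omega]
    rw [show (List.replicate (cs.length + 1) 0)
          = List.replicate cs.length 0 ++ (List.range (cs.length + 1 - cs.length)).map
              (fun k => Sv cs p x (cs.length + k)) by
        rw [show cs.length + 1 - cs.length = 1 by omega]
        simp [Sv, List.replicate_succ', poly, PySem.Int.mod]]
    rw [Sinv cs p x cs.length rfl cs.length le_rfl]
    rw [show (T : Int) + 1 = ((T + 1 : Nat) : Int) by push_cast; ring]
    rw [PySem.List.pyRange_zero_natCast, List.map_map]
    -- both sides are maps over List.range (T + 1); compare elementwise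
    apply List.map_congr_left
    intro k hk
    have hkT : k ≤ T := by
      simp only [List.mem_range] at hk
      omega
    simp only [Function.comp_apply]
    have hS1 : PySem.List.pyGetD ((List.range (cs.length + 1)).map (Sv cs p x)) ((k : Int)) 0
        = Sv cs p x k := by
      rw [PySem.List.pyGetD_natCast, List.getD_eq_getElem _ 0 (by simp; omega)]
      simp
    have hS2 : PySem.List.pyGetD ((List.range (cs.length + 1)).map (Sv cs p x)) ((k : Int) + (M : Int)) 0
        = Sv cs p x (k + M) := by
      rw [show (k : Int) + (M : Int) = ((k + M : Nat) : Int) by push_cast; ring]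
      rw [PySem.List.pyGetD_natCast, List.getD_eq_getElem _ 0 (by simp; omega)]
      simp
    rw [hS1, hS2, window_formula cs p x M k (by omega)]
    rw [hseq_eq cs p x M T hM hTM (T - k) (by omega), show T - (T - k) = k by omega]
  · -- degenerate case: pattern_length = 0 and text = ""
    subst hm0
    subst htext
    simp [precompute_hashes, precompute_hashes_alt, computeHash, PySem.Int.powMod,
      PySem.List.slice, PySem.List.pySetD,
      PySem.List.pySet?, PySem.List.pyIdx?, PySem.Int.mod, PySem.List.pyRange,
      PySem.List.pyGetD]
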